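-- pv_equiv track=rewrite | github.com/teamWSIZ/python1-2022 | src/algo/z4/zadania/c.py | is_connected_with_stopover
-- ===== SOURCE A (Python) =====
-- def is_connected_with_stopover(train_data: list[tuple[int, int]], a: int, b: int) -> bool:
--     start = []
--     destination = []
--     for each in train_data:
--         if each[0] == a:
--             start.append(each)
--         if each[1] == b:
--             destination.append(each)
--
--     for out in range(len(start)):
--         for in1 in range(len(destination)):
--             if start[out][1] == destination[in1][0]:
--                 return True
-- ===== SOURCE B (Python) =====
-- def is_connected_with_stopover(train_data: list[tuple[int, int]], a: int, b: int) -> bool: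
--     outs = sorted(t[1] for t in train_data if t[0] == a)
--     ins = sorted(t[0] for t in train_data if t[1] == b)
--     i = j = 0
--     while i < len(outs) and j < len(ins):
--         if outs[i] == ins[j]:
--             return True
--         if outs[i] < ins[j]:
--             i += 1
--         else:
--             j += 1
-- ===== Notes on version B (the rewrite author's own statement) =====
-- stated objective: alternative
-- what changed: Replaces A's two filtered lists and nested membership scan with sort-then-merge: both endpoint lists are sorted and a two-pointer merge walk detects a common intermediate station; no measured speedup on the generated inputs.
import Mathlib
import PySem

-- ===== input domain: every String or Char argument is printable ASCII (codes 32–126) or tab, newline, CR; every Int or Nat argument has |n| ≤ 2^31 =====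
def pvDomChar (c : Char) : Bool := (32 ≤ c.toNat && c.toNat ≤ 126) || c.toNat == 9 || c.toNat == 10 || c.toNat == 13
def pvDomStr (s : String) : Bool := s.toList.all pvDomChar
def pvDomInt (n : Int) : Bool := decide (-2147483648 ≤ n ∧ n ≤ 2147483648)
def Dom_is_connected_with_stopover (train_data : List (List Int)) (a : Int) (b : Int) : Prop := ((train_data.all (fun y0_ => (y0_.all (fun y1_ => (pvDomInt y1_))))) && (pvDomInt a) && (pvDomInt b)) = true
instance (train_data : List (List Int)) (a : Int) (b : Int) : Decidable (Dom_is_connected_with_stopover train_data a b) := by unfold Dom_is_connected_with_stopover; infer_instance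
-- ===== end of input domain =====

-- B replaces A's nested scan over the two filtered lists by sort-then-merge: both
-- endpoint lists are sorted and a two-pointer merge walk looks for a common
-- intermediate station (objective: alternative).
-- Both pythons return True or None (no explicit return) — ported as Option Bool.

-- ===== PORT A =====
-- inner 'for in1 in range(len(destination))' loop with its early return
def pvInnerA (s : List Int) (dest : List (List Int)) : Bool :=
  match dest with
  | [] => false
  | d :: rest =>
      if PySem.List.pyGetD s 1 0 == PySem.List.pyGetD d 0 0 then true else pvInnerA s rest

-- outer 'for out in range(len(start))' loop; falling through returns None
def pvOuterA (start dest : List (List Int)) : Option Bool :=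
  match start with
  | [] => none
  | s :: rest => if pvInnerA s dest then some true else pvOuterA rest dest

-- one iteration of the first loop: the two appending ifs
def pvStepA (a b : Int) (p : List (List Int) × List (List Int)) (each : List Int) :
    List (List Int) × List (List Int) :=
  let p1 := if PySem.List.pyGetD each 0 0 == a then (p.1 ++ [each], p.2) else p
  if PySem.List.pyGetD each 1 0 == b then (p1.1, p1.2 ++ [each]) else p1

def is_connected_with_stopover (train_data : List (List Int)) (a : Int) (b : Int) : Option Bool :=
  -- first loop: build 'start' and 'destination' by appending
  let p := train_data.foldl (pvStepA a b) ([], [])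
  pvOuterA p.1 p.2

-- ===== PORT B =====
-- the while-loop: two index pointers over the sorted lists, here the two list suffixes
def pvMerge : List Int → List Int → Option Bool
  | x :: xs, y :: ys =>
      if x == y then some true
      else if x < y then pvMerge xs (y :: ys)
      else pvMerge (x :: xs) ys
  | _, _ => none

def is_connected_with_stopover_alt (train_data : List (List Int)) (a : Int) (b : Int) : Option Bool :=
  -- outs = sorted(t[1] for t in train_data if t[0] == a); ins likewise
  let outs := PySem.List.sorted
    ((train_data.filter (fun t => PySem.List.pyGetD t 0 0 == a)).map (fun t => PySem.List.pyGetD t 1 0))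
    (fun x => x) false
  let ins := PySem.List.sorted
    ((train_data.filter (fun t => PySem.List.pyGetD t 1 0 == b)).map (fun t => PySem.List.pyGetD t 0 0))
    (fun x => x) false
  pvMerge outs ins

-- ===== PRECONDITION & SPEC =====
-- Pre_ excludes inputs on which A raises IndexError: a row with fewer than two entries
-- (each[0]/each[1] are read for every row); B raises there too.
def Pre_is_connected_with_stopover (train_data : List (List Int)) (a : Int) (b : Int) : Prop :=
  ∀ row ∈ train_data, 2 ≤ row.length
instance (train_data : List (List Int)) (a : Int) (b : Int) : Decidable (Pre_is_connected_with_stopover train_data a b) := by unfold Pre_is_connected_with_stopover; infer_instance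

def pvWitness_is_connected_with_stopover : List (List Int) × Int × Int := ([[1, 2], [2, 3]], 1, 3)

def Spec_is_connected_with_stopover (train_data : List (List Int)) (a : Int) (b : Int) (out : Option Bool) : Prop := out = is_connected_with_stopover_alt train_data a b
instance (train_data : List (List Int)) (a : Int) (b : Int) (out : Option Bool) : Decidable (Spec_is_connected_with_stopover train_data a b out) := by unfold Spec_is_connected_with_stopover; infer_instance

-- ===== CLAIM (what is proved, stated in full; the proofs are below) =====
def Claim_equal_is_connected_with_stopover : Prop := ∀ (train_data : List (List Int)) (a : Int) (b : Int), Dom_is_connected_with_stopover train_data a b → Pre_is_connected_with_stopover train_data a b → Spec_is_connected_with_stopover train_data a b (is_connected_with_stopover train_data a b)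

-- ===== LEMMAS AND PROOFS =====

theorem pvInnerA_eq_any (s : List Int) (dest : List (List Int)) :
    pvInnerA s dest = dest.any (fun d => PySem.List.pyGetD s 1 0 == PySem.List.pyGetD d 0 0) := by
  induction dest with
  | nil => rfl
  | cons d rest ih => by_cases h : PySem.List.pyGetD s 1 0 == PySem.List.pyGetD d 0 0 <;>
      simp [pvInnerA, h, ih]

theorem pvOuterA_eq_if (start dest : List (List Int)) :
    pvOuterA start dest =
      if start.any (fun s => pvInnerA s dest) then some true else none := by
  induction start with
  | nil => rfl
  | cons s rest ih =>
      by_cases h : pvInnerA s dest <;> simp [pvOuterA, h, ih]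

theorem pvFoldA_eq (td : List (List Int)) (a b : Int) (acc : List (List Int) × List (List Int)) :
    td.foldl (pvStepA a b) acc
    = (acc.1 ++ td.filter (fun e => PySem.List.pyGetD e 0 0 == a),
       acc.2 ++ td.filter (fun e => PySem.List.pyGetD e 1 0 == b)) := by
  induction td generalizing acc with
  | nil => simp
  | cons e rest ih =>
      rw [List.foldl_cons, ih]
      unfold pvStepA
      by_cases h0 : PySem.List.pyGetD e 0 0 == a <;>
      by_cases h1 : PySem.List.pyGetD e 1 0 == b <;>
        simp [h0, h1]

-- pvMerge never returns 'some false'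
theorem pvMerge_none_or_true (xs ys : List Int) :
    pvMerge xs ys = none ∨ pvMerge xs ys = some true := by
  induction xs, ys using pvMerge.induct with
  | case1 x xs y ys h => right; simp [pvMerge, h]
  | case2 x xs y ys h h' ih => simpa [pvMerge, h, h'] using ih
  | case3 x xs y ys h h' ih => simpa [pvMerge, h, h'] using ih
  | case4 xs ys hno =>
      left
      cases xs with
      | nil => simp [pvMerge]
      | cons x xs' =>
        cases ys with
        | nil => simp [pvMerge]
        | cons y ys' => exact absurd (hno x xs' y ys' rfl rfl) not_false

-- on ≤-sorted lists, the merge walk returns 'some true' exactly when a common element exists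
theorem pvMerge_true_iff (xs ys : List Int)
    (hx : xs.Pairwise (· ≤ ·)) (hy : ys.Pairwise (· ≤ ·)) :
    pvMerge xs ys = some true ↔ ∃ z, z ∈ xs ∧ z ∈ ys := by
  induction xs, ys using pvMerge.induct with
  | case1 x xs y ys h =>
      rw [pvMerge, if_pos h]
      constructor
      · intro _; exact ⟨x, by simp, by simp [eq_of_beq h]⟩
      · intro _; rfl
  | case2 x xs y ys h h' ih =>
      rw [pvMerge, if_neg h, if_pos h']
      rw [ih (List.Pairwise.of_cons hx) hy]
      constructor
      · rintro ⟨z, hz1, hz2⟩; exact ⟨z, List.mem_cons_of_mem _ hz1, hz2⟩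
      · rintro ⟨z, hz1, hz2⟩
        rcases List.mem_cons.mp hz1 with rfl | hz1'
        · exfalso
          rcases List.mem_cons.mp hz2 with rfl | hz2'
          · simp at h
          · have := (List.pairwise_cons.mp hy).1 z hz2'
            omega
        · exact ⟨z, hz1', hz2⟩
  | case3 x xs y ys h h' ih =>
      rw [pvMerge, if_neg h, if_neg h']
      rw [ih hx (List.Pairwise.of_cons hy)]
      have hyx : y < x := by
        have h1 : ¬ x = y := by simpa using h
        have h2 : ¬ x < y := by simpa using h'
        omega
      constructor
      · rintro ⟨z, hz1, hz2⟩; exact ⟨z, hz1, List.mem_cons_of_mem _ hz2⟩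
      · rintro ⟨z, hz1, hz2⟩
        rcases List.mem_cons.mp hz2 with rfl | hz2'
        · exfalso
          rcases List.mem_cons.mp hz1 with rfl | hz1'
          · omega
          · have := (List.pairwise_cons.mp hx).1 z hz1'
            omega
        · exact ⟨z, hz1, hz2'⟩
  | case4 xs ys hno =>
      cases xs with
      | nil => simp [pvMerge]
      | cons x xs' =>
        cases ys with
        | nil => simp [pvMerge]
        | cons y ys' => exact absurd (hno x xs' y ys' rfl rfl) not_false

-- A's loop condition holds iff the two endpoint lists share an element
theorem pvCondA_iff (td : List (List Int)) (a b : Int) :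
    ((td.filter (fun e => PySem.List.pyGetD e 0 0 == a)).any
        (fun s => pvInnerA s (td.filter (fun e => PySem.List.pyGetD e 1 0 == b))) = true)
    ↔ (∃ z, z ∈ (td.filter (fun t => PySem.List.pyGetD t 0 0 == a)).map (fun t => PySem.List.pyGetD t 1 0)
          ∧ z ∈ (td.filter (fun t => PySem.List.pyGetD t 1 0 == b)).map (fun t => PySem.List.pyGetD t 0 0)) := by
  simp only [List.any_eq_true, pvInnerA_eq_any, List.mem_map, List.mem_filter]
  constructor
  · rintro ⟨s, hs, d, hd, heq⟩
    exact ⟨PySem.List.pyGetD s 1 0, ⟨s, hs, rfl⟩, ⟨d, hd, (eq_of_beq heq).symm⟩⟩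
  · rintro ⟨z, ⟨s, hs, rfl⟩, ⟨d, hd, hdz⟩⟩
    exact ⟨s, hs, d, hd, beq_of_eq hdz.symm⟩

-- ===== VERDICT (by name: the statement is the Claim_ definition above) =====
theorem is_connected_with_stopover_spec : Claim_equal_is_connected_with_stopover := by
  intro td a b _ _
  unfold Spec_is_connected_with_stopover is_connected_with_stopover is_connected_with_stopover_alt
  dsimp only
  rw [pvFoldA_eq]
  dsimp only [List.nil_append]
  rw [pvOuterA_eq_if]
  have hmem := pvMerge_true_iff
    (PySem.List.sorted ((td.filter (fun t => PySem.List.pyGetD t 0 0 == a)).map (fun t => PySem.List.pyGetD t 1 0)) (fun x => x) false)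
    (PySem.List.sorted ((td.filter (fun t => PySem.List.pyGetD t 1 0 == b)).map (fun t => PySem.List.pyGetD t 0 0)) (fun x => x) false)
    (by simpa using PySem.List.sorted_pairwise _ _)
    (by simpa using PySem.List.sorted_pairwise _ _)
  simp only [PySem.List.mem_sorted] at hmem
  by_cases hc : (td.filter (fun e => PySem.List.pyGetD e 0 0 == a)).any
      (fun s => pvInnerA s (td.filter (fun e => PySem.List.pyGetD e 1 0 == b))) = true
  · rw [if_pos hc]
    exact (hmem.mpr ((pvCondA_iff td a b).mp hc)).symm
  · rw [if_neg hc]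
    rcases pvMerge_none_or_true
        (PySem.List.sorted ((td.filter (fun t => PySem.List.pyGetD t 0 0 == a)).map (fun t => PySem.List.pyGetD t 1 0)) (fun x => x) false)
        (PySem.List.sorted ((td.filter (fun t => PySem.List.pyGetD t 1 0 == b)).map (fun t => PySem.List.pyGetD t 0 0)) (fun x => x) false)
      with hn | ht
    · exact hn.symm
    · exact absurd ((pvCondA_iff td a b).mpr (hmem.mp ht)) hc
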